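-- pv_equiv track=rewrite | github.com/TejasMate/WinGetManifestGeneratorTool | src/sources/base/url_matcher.py | filter_urls_by_patterns
-- ===== SOURCE A (Python) =====
-- from typing import List, Set
--
-- def filter_urls_by_patterns(urls: List[str], patterns: Set[str]) -> List[str]:
--     """Filter URLs based on extracted patterns."""
--     if not patterns or not urls:
--         return urls
--
--     filtered_urls = []
--     pattern_extensions = set()
--
--     # Extract extensions from patterns
--     for pattern in patterns:
--         parts = pattern.split('-')
--         if parts:
--             last_part = parts[-1]
--             if last_part and not last_part.isdigit():
--                 pattern_extensions.add(last_part.lower())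
--
--     if not pattern_extensions:
--         return urls
--
--     for url in urls:
--         if not url or not isinstance(url, str):
--             continue
--
--         url = url.strip()
--
--         # Check if URL matches any of the pattern extensions
--         for ext in pattern_extensions:
--             if url.lower().endswith(f'.{ext}') or f'.{ext}/' in url.lower():
--                 filtered_urls.append(url)
--                 break
--
--     return filtered_urls if filtered_urls else urls
-- ===== SOURCE B (Python) =====
-- from typing import List, Set
--
--
-- def _matches(low: str, exts: Set[str]) -> bool:
--     """True iff low contains '.ext' at the end or '.ext/' anywhere, for some ext in exts."""
--     for i, ch in enumerate(low):
--         if ch == '.':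
--             tail = low[i + 1:]
--             if tail in exts:
--                 return True
--             for j, c in enumerate(tail):
--                 if c == '/' and tail[:j] in exts:
--                     return True
--     return False
--
--
-- def filter_urls_by_patterns(urls: List[str], patterns: Set[str]) -> List[str]:
--     """Filter URLs based on extracted patterns."""
--     if not patterns or not urls:
--         return urls
--
--     pattern_extensions = {
--         last.lower()
--         for pattern in patterns
--         for last in [pattern.split('-')[-1]]
--         if last and not last.isdigit()
--     }
--
--     if not pattern_extensions:
--         return urls
--
--     stripped = (url.strip() for url in urls if url)
--     filtered_urls = [s for s in stripped if _matches(s.lower(), pattern_extensions)]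
--
--     return filtered_urls if filtered_urls else urls
-- ===== Notes on version B (the rewrite author's own statement) =====
-- stated objective: faster
-- what changed: Per URL, instead of testing every extension against the URL with endswith/substring search, B scans the URL once: at each '.' it takes the tail and the prefixes ending at each later '/' and tests them by hashed set membership, removing the per-extension factor; extension derivation becomes a set comprehension and the URL loop a comprehension.
import Mathlib
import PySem

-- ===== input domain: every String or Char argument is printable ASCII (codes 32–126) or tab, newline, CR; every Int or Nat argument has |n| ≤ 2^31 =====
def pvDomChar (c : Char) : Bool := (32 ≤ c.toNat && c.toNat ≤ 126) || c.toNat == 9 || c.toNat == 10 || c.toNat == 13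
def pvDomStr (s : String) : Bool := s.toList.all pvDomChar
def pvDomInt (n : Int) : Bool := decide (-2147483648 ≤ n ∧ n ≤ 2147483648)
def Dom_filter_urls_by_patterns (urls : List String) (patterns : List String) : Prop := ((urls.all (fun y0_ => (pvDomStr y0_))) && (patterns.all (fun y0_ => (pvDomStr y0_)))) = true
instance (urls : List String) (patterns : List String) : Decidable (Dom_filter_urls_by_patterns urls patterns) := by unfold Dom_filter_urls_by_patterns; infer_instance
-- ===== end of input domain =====

-- B replaces the per-extension endswith/substring scans by a single left-to-right scan of each
-- URL that, at each '.', tests the tail and the prefixes ending at each later '/' by set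
-- membership, removing the per-extension factor (objective: faster; measured faster in a timing run).


-- ===== PORT A =====
-- pattern.split('-')[-1]  (split('-') is never empty; pyGet? (-1) is Python's [-1])
def pvLastPart (pattern : String) : List Char :=
  (PySem.List.pyGet? (PySem.Chars.splitOn pattern.toList ['-']) (-1)).getD []

def filter_urls_by_patterns (urls : List String) (patterns : List String) : List String :=
  if patterns = [] ∨ urls = [] then urls else
  let pattern_extensions : List (List Char) :=
    patterns.foldl (fun s pattern =>
      let parts := PySem.Chars.splitOn pattern.toList ['-']
      if parts ≠ [] then
        let last_part := pvLastPart pattern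
        if last_part ≠ [] ∧ PySem.Chars.strIsdigit last_part = false then
          PySem.Set.add s (PySem.Chars.lower last_part)
        else s
      else s) []
  if pattern_extensions = [] then urls else
  let filtered_urls := urls.foldl (fun acc url =>
    if url = "" then acc else
    let u := PySem.Chars.strip url.toList
    if pattern_extensions.any (fun ext =>
        PySem.Chars.endswith (PySem.Chars.lower u) ('.' :: ext) ||
        PySem.Chars.isIn ('.' :: ext ++ ['/']) (PySem.Chars.lower u)) then
      acc ++ [String.ofList u]
    else acc) []
  if filtered_urls = [] then urls else filtered_urls

-- ===== PORT B =====
-- the inner 'for j, c in enumerate(tail): if c == "/" and tail[:j] in exts' loop of _matches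
def pvSlashCheck (exts : List (List Char)) (tail : List Char) : Bool :=
  (PySem.List.enumerate tail).any (fun jc =>
    jc.2 == '/' && exts.contains (PySem.List.slice tail none (some jc.1)))

-- the 'for i, ch in enumerate(low)' loop of _matches, as recursion on the suffixes
def pvMatches (exts : List (List Char)) : List Char → Bool
  | [] => false
  | c :: tail =>
      (c == '.' && (exts.contains tail || pvSlashCheck exts tail)) || pvMatches exts tail

def filter_urls_by_patterns_alt (urls : List String) (patterns : List String) : List String :=
  if patterns = [] ∨ urls = [] then urls else
  let pattern_extensions : List (List Char) :=
    PySem.Set.ofList (patterns.filterMap (fun pattern =>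
      let last := pvLastPart pattern
      if last ≠ [] ∧ PySem.Chars.strIsdigit last = false then
        some (PySem.Chars.lower last)
      else none))
  if pattern_extensions = [] then urls else
  let stripped := (urls.filter (fun url => decide (url ≠ ""))).map
      (fun url => PySem.Chars.strip url.toList)
  let filtered_urls :=
    (stripped.filter (fun s => pvMatches pattern_extensions (PySem.Chars.lower s))).map String.ofList
  if filtered_urls = [] then urls else filtered_urls

-- ===== PRECONDITION & SPEC =====
def Spec_filter_urls_by_patterns (urls : List String) (patterns : List String) (out : List String) : Prop := out = filter_urls_by_patterns_alt urls patterns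
instance (urls : List String) (patterns : List String) (out : List String) : Decidable (Spec_filter_urls_by_patterns urls patterns out) := by unfold Spec_filter_urls_by_patterns; infer_instance

-- ===== CLAIM (what is proved, stated in full; the proofs are below) =====
def Claim_equal_filter_urls_by_patterns : Prop := ∀ (urls : List String) (patterns : List String), Dom_filter_urls_by_patterns urls patterns → Spec_filter_urls_by_patterns urls patterns (filter_urls_by_patterns urls patterns)

-- ===== LEMMAS AND PROOFS =====

-- A's extension-accumulating foldl is B's Set.ofList of the filterMap
theorem pvExts_eq (patterns : List String) (s : List (List Char)) :
    patterns.foldl (fun s pattern =>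
      let parts := PySem.Chars.splitOn pattern.toList ['-']
      if parts ≠ [] then
        let last_part := pvLastPart pattern
        if last_part ≠ [] ∧ PySem.Chars.strIsdigit last_part = false then
          PySem.Set.add s (PySem.Chars.lower last_part)
        else s
      else s) s
    = (patterns.filterMap (fun pattern =>
        let last := pvLastPart pattern
        if last ≠ [] ∧ PySem.Chars.strIsdigit last = false then
          some (PySem.Chars.lower last)
        else none)).foldl PySem.Set.add s := by
  induction patterns generalizing s with
  | nil => rfl
  | cons p l ih =>
    rw [List.foldl_cons]
    by_cases hc : pvLastPart p ≠ [] ∧ PySem.Chars.strIsdigit (pvLastPart p) = false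
    · have hp : PySem.Chars.splitOn p.toList ['-'] ≠ [] := fun h =>
        hc.1 (by simp [pvLastPart, h, PySem.List.pyGet?])
      rw [List.filterMap_cons_some (b := PySem.Chars.lower (pvLastPart p)) (by simp [hc]),
        List.foldl_cons]
      simp only [if_pos hp, if_pos hc]
      exact ih _
    · rw [List.filterMap_cons_none (by simp [hc])]
      by_cases hp : PySem.Chars.splitOn p.toList ['-'] ≠ []
      · simp only [if_pos hp, if_neg hc]
        exact ih s
      · simp only [if_neg hp]
        exact ih s

-- pvSlashCheck finds exactly the '/'-terminated prefixes of tail that lie in exts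
theorem pvSlashCheck_iff (exts : List (List Char)) (tail : List Char) :
    pvSlashCheck exts tail = true ↔ ∃ p q, tail = p ++ '/' :: q ∧ p ∈ exts := by
  simp only [pvSlashCheck, List.any_eq_true, Bool.and_eq_true, beq_iff_eq,
    List.contains_iff_mem, PySem.List.mem_enumerate_iff]
  constructor
  · rintro ⟨jc, ⟨k, hk, rfl⟩, hsl, hmem⟩
    simp only [zero_add] at hsl hmem ⊢
    rw [PySem.List.slice_to_natCast] at hmem
    refine ⟨tail.take k, tail.drop (k + 1), ?_, hmem⟩
    conv_lhs => rw [← List.take_append_drop k tail]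
    rw [List.drop_eq_getElem_cons hk, hsl]
  · rintro ⟨p, q, rfl, hmem⟩
    have hk : p.length < (p ++ '/' :: q).length := by simp
    refine ⟨((p.length : Int), (p ++ '/' :: q)[p.length]), ⟨p.length, hk, by simp⟩, ?_, ?_⟩
    · simp
    · rw [PySem.List.slice_to_natCast]
      simpa [List.take_append] using hmem

-- the central lemma: A's per-URL any-over-extensions check equals B's single scan
theorem pvMatches_eq (exts : List (List Char)) (low : List Char) :
    exts.any (fun ext =>
        PySem.Chars.endswith low ('.' :: ext) ||
        PySem.Chars.isIn ('.' :: ext ++ ['/']) low)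
    = pvMatches exts low := by
  induction low with
  | nil =>
    simp [pvMatches, PySem.Chars.endswith_iff, PySem.Chars.isIn_iff_infix]
  | cons c t ih =>
    rw [show pvMatches exts (c :: t)
        = ((c == '.' && (exts.contains t || pvSlashCheck exts t)) || pvMatches exts t) from rfl,
      ← ih, Bool.eq_iff_iff]
    simp only [List.any_eq_true, Bool.or_eq_true, Bool.and_eq_true, beq_iff_eq,
      List.contains_iff_mem, pvSlashCheck_iff, PySem.Chars.endswith_iff,
      PySem.Chars.isIn_iff_infix, List.suffix_cons_iff, List.infix_cons_iff,
      List.cons_append, List.cons_prefix_cons]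
    constructor
    · rintro ⟨e, he, (h | h) | (⟨hc, hpre⟩ | h)⟩
      · obtain ⟨hc, het⟩ := (List.cons.injEq _ _ _ _).mp h
        exact Or.inl ⟨hc.symm, Or.inl (het ▸ he)⟩
      · exact Or.inr ⟨e, he, Or.inl h⟩
      · obtain ⟨q, hq⟩ := hpre
        exact Or.inl ⟨hc.symm, Or.inr ⟨e, q, by simp [← hq], he⟩⟩
      · exact Or.inr ⟨e, he, Or.inr h⟩
    · rintro (⟨hc, ht | ⟨p, q, hpq, hm⟩⟩ | ⟨e, he, h | h⟩)
      · exact ⟨t, ht, Or.inl (Or.inl (by rw [hc]))⟩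
      · exact ⟨p, hm, Or.inr (Or.inl ⟨hc.symm, ⟨q, by simp [hpq]⟩⟩)⟩
      · exact ⟨e, he, Or.inl (Or.inr h)⟩
      · exact ⟨e, he, Or.inr (Or.inr h)⟩

-- A's URL foldl equals B's filter/map chain, given the per-URL predicates agree
theorem pvFiltered_eq (urls : List String) (exts : List (List Char)) :
    urls.foldl (fun acc url =>
      if url = "" then acc else
      let u := PySem.Chars.strip url.toList
      if exts.any (fun ext =>
          PySem.Chars.endswith (PySem.Chars.lower u) ('.' :: ext) ||
          PySem.Chars.isIn ('.' :: ext ++ ['/']) (PySem.Chars.lower u)) then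
        acc ++ [String.ofList u]
      else acc) []
    = (((urls.filter (fun url => decide (url ≠ ""))).map
          (fun url => PySem.Chars.strip url.toList)).filter
            (fun s => pvMatches exts (PySem.Chars.lower s))).map String.ofList := by
  have hstep : ∀ (acc : List String) (url : String),
      (if url = "" then acc else
        let u := PySem.Chars.strip url.toList
        if exts.any (fun ext =>
            PySem.Chars.endswith (PySem.Chars.lower u) ('.' :: ext) ||
            PySem.Chars.isIn ('.' :: ext ++ ['/']) (PySem.Chars.lower u)) then
          acc ++ [String.ofList u]
        else acc)
      = (if (decide (url ≠ "") &&
             pvMatches exts (PySem.Chars.lower (PySem.Chars.strip url.toList))) = true then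
          acc ++ [String.ofList (PySem.Chars.strip url.toList)] else acc) := by
    intro acc url
    by_cases h0 : url = ""
    · simp [h0]
    · rw [if_neg h0]
      simp only []
      rw [pvMatches_eq]
      simp [h0]
  rw [PySem.List.foldl_congr_mem _ _ _ _ (fun acc url _ => hstep acc url),
    PySem.List.foldl_append_if
      (fun url => decide (url ≠ "") &&
        pvMatches exts (PySem.Chars.lower (PySem.Chars.strip url.toList)))
      (fun url => String.ofList (PySem.Chars.strip url.toList))]
  simp only [List.filter_map, Function.comp_def, List.map_map, List.filter_filter,
    List.nil_append]
  congr 1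
  apply List.filter_congr
  intro a _
  rw [Bool.and_comm]

-- ===== VERDICT (by name: the statement is the Claim_ definition above) =====
theorem filter_urls_by_patterns_spec : Claim_equal_filter_urls_by_patterns := by
  intro urls patterns _
  unfold Spec_filter_urls_by_patterns filter_urls_by_patterns filter_urls_by_patterns_alt
  by_cases h0 : patterns = [] ∨ urls = []
  · simp [h0]
  · simp only [if_neg h0]
    rw [pvExts_eq, pvFiltered_eq]
    rfl
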